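-- pv_equiv track=rewrite | github.com/DanielPeretz30/CompetitiveProgramming | Codility/Challenge/NewMotorway/code.py | solution
-- ===== SOURCE A (Python) =====
-- import math
--
-- def solution(A):
--     mod = int(math.pow(10,9))+7
--     n = len(A)
--     maxSave = 0
--     index = n-1
--     for i in range(n):
--         can = (i+1)*(A[-1]-A[i])
--         if can > maxSave:
--             maxSave = can
--             index = i
--     result = 0
--     for i in range(index):
--         result += A[index]-A[i]
--     for i in range(index+1,n):
--         result += A[-1]-A[i]
--     result = result%mod
--     return result
-- ===== SOURCE B (Python) =====
-- import math
--
-- def solution(A):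
--     mod = int(math.pow(10, 9)) + 7
--     if not A:
--         return 0
--     last = A[-1]
--     total = 0
--     save = 0
--     for i, a in enumerate(A):
--         total += a
--         save = max(save, (i + 1) * (last - a))
--     return (len(A) * last - total - save) % mod
-- ===== Notes on version B (the rewrite author's own statement) =====
-- stated objective: alternative
-- what changed: B never finds or stores a best index at all: one fused pass maintains only the running total and the maximum saving (i+1)*(last-A[i]) where last is the final element, and returns (n*last - total - maxSave) % mod, using the identity that A's three-loop result equals the baseline n*last - sum(A) minus the best saving regardless of which index attains it.
import Mathlib
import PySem

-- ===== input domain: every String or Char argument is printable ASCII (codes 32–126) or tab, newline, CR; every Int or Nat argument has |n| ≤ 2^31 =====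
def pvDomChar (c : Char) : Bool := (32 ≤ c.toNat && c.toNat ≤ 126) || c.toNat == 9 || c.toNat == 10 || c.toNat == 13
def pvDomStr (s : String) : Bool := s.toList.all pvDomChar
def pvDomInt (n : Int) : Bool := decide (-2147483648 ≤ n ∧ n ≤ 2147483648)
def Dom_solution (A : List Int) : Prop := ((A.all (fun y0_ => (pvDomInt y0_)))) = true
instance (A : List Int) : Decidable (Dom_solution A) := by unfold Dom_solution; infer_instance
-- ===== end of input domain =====

-- B drops A's best-index bookkeeping entirely: one fused pass keeps only the running sum
-- and the maximum saving, and the result is baseline - maxSave (objective: alternative).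

-- ===== PORT A =====
-- int(math.pow(10,9)) = 1000000000 exactly (10^9 is exactly representable as a float)
def solution (A : List Int) : Int :=
  let md : Int := 1000000000 + 7
  let n : Int := PySem.List.len A
  -- for i in range(n): can = (i+1)*(A[-1]-A[i]); if can > maxSave: maxSave, index = can, i
  let st := (PySem.List.pyRange 0 n 1).foldl
    (fun (st : Int × Int) i =>
      let can := (i + 1) * (PySem.List.pyGetD A (-1) 0 - PySem.List.pyGetD A i 0)
      if can > st.1 then (can, i) else st)
    (0, n - 1)
  let index := st.2
  -- for i in range(index): result += A[index]-A[i]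
  let r1 := (PySem.List.pyRange 0 index 1).foldl
    (fun r i => r + (PySem.List.pyGetD A index 0 - PySem.List.pyGetD A i 0)) 0
  -- for i in range(index+1,n): result += A[-1]-A[i]
  let r2 := (PySem.List.pyRange (index + 1) n 1).foldl
    (fun r i => r + (PySem.List.pyGetD A (-1) 0 - PySem.List.pyGetD A i 0)) r1
  PySem.Int.mod r2 md

-- ===== PORT B =====
def solution_alt (A : List Int) : Int :=
  let md : Int := 1000000000 + 7
  if A = [] then 0
  else
    let last := PySem.List.pyGetD A (-1) 0
    -- for i, a in enumerate(A): total += a; save = max(save, (i+1)*(last-a))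
    let st := (PySem.List.enumerate A).foldl
      (fun (st : Int × Int) p => (st.1 + p.2, max st.2 ((p.1 + 1) * (last - p.2)))) (0, 0)
    PySem.Int.mod (PySem.List.len A * last - st.1 - st.2) md

-- ===== PRECONDITION & SPEC =====
def Spec_solution (A : List Int) (out : Int) : Prop := out = solution_alt A
instance (A : List Int) (out : Int) : Decidable (Spec_solution A out) := by unfold Spec_solution; infer_instance

-- ===== CLAIM (what is proved, stated in full; the proofs are below) =====
def Claim_equal_solution : Prop := ∀ (A : List Int), Dom_solution A → Spec_solution A (solution A)

-- ===== LEMMAS AND PROOFS =====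

-- reference recursion for A's best-index scan
def bestF (g : Nat → Int) (d : Int) : Nat → Int × Int
  | 0 => ((0 : Int), d)
  | n+1 => let s := bestF g d n; if g n > s.1 then (g n, (n : Int)) else s

theorem foldl_range_best (g : Nat → Int) (d : Int) (n : Nat) :
    (List.range n).foldl (fun st k => if g k > st.1 then (g k, (k : Int)) else st) ((0 : Int), d)
      = bestF g d n := by
  induction n with
  | zero => simp [bestF]
  | succ n ih => simp [List.range_succ, bestF, ih]

-- the first component of A's scan state is the running max of the candidate gains
theorem bestF_fst (g : Nat → Int) (d : Int) (n : Nat) :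
    (bestF g d n).1 = ((List.range n).map g).foldl max 0 := by
  induction n with
  | zero => simp [bestF]
  | succ n ih =>
    simp only [List.range_succ, List.map_append, List.foldl_append, bestF, List.map_cons,
      List.map_nil, List.foldl_cons, List.foldl_nil, ← ih]
    rcases lt_or_ge (bestF g d n).1 (g n) with h | h
    · simp [h, max_eq_right (le_of_lt h)]
    · simp [not_lt.mpr h, max_eq_left h]

-- either the scan never fired (state = (0, d)) or it stopped at some k < n with g k = max
theorem bestF_cases (g : Nat → Int) (d : Int) (n : Nat) :
    (bestF g d n).1 = 0 ∧ (bestF g d n).2 = d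
      ∨ ∃ k < n, (bestF g d n).2 = (k : Int) ∧ g k = (bestF g d n).1 := by
  induction n with
  | zero => left; exact ⟨rfl, rfl⟩
  | succ n ih =>
    by_cases h : g n > (bestF g d n).1
    · right
      refine ⟨n, Nat.lt_succ_self n, ?_, ?_⟩ <;> simp [bestF, h]
    · rcases ih with ⟨h1, h2⟩ | ⟨k, hk, h1, h2⟩
      · left
        have hle : ¬ 0 < g n := by rw [h1] at h; exact h
        constructor <;> simp [bestF, hle, h1, h2]
      · right; exact ⟨k, Nat.lt_succ_of_lt hk, by simp [bestF, h, h1], by simp [bestF, h, h2]⟩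

theorem enumerate_map (xs : List Int) (s : Int) (F : Int × Int → Int) :
    (PySem.List.enumerate xs s).map F
      = (List.range xs.length).map (fun (k : Nat) => F (s + (k : Int), xs.getD k 0)) := by
  induction xs generalizing s with
  | nil => simp [PySem.List.enumerate]
  | cons x t ih =>
    rw [PySem.List.enumerate_cons, List.map_cons, ih, List.length_cons,
      List.range_succ_eq_map, List.map_cons, List.map_map]
    simp only [Nat.cast_zero, add_zero, List.getD_cons_zero]
    congr 1
    apply List.map_congr_left
    intro k _
    simp only [Function.comp_apply, List.getD_cons_succ]
    congr 2
    omega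

theorem sum_map_sub_const (l : List Int) (c : Int) (h : Int → Int) :
    (l.map (fun x => c - h x)).sum = (l.length : Int) * c - (l.map h).sum := by
  induction l with
  | nil => simp
  | cons x t ih => simp [ih]; ring

-- A's two summation loops at any in-range index I telescope to a closed form
theorem sums_eq (A : List Int) (I : Int) (h0 : 0 ≤ I) (h1 : I < (A.length : Int)) :
    (PySem.List.pyRange (I + 1) ((A.length : Int)) 1).foldl
        (fun r i => r + (PySem.List.pyGetD A (-1) 0 - PySem.List.pyGetD A i 0))
        ((PySem.List.pyRange 0 I 1).foldl
          (fun r i => r + (PySem.List.pyGetD A I 0 - PySem.List.pyGetD A i 0)) 0)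
      = (I + 1) * PySem.List.pyGetD A I 0
          + ((A.length : Int) - 1 - I) * PySem.List.pyGetD A (-1) 0 - A.sum := by
  have hIto : (I.toNat : Int) = I := Int.toNat_of_nonneg h0
  have hIlt : I.toNat < A.length := by omega
  have hdrop1 : (PySem.List.pyRange (I+1) ((A.length : Int)) 1).map (fun j => PySem.List.pyGetD A j 0)
      = A.drop (I+1).toNat := PySem.List.map_pyGetD_pyRange' A 0 (by omega)
  have hsplit : PySem.List.pyRange 0 ((A.length : Int)) 1
      = PySem.List.pyRange 0 I 1 ++ PySem.List.pyRange I ((A.length : Int)) 1 :=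
    PySem.List.pyRange_one_append 0 I _ h0 (le_of_lt h1)
  have hdropI : (PySem.List.pyRange I ((A.length : Int)) 1).map (fun j => PySem.List.pyGetD A j 0)
      = A.drop I.toNat := PySem.List.map_pyGetD_pyRange' A 0 h0
  have htake : (PySem.List.pyRange 0 I 1).map (fun j => PySem.List.pyGetD A j 0)
      = A.take I.toNat := by
    have hall := PySem.List.map_pyGetD_pyRange_zero' A 0
    rw [hsplit, List.map_append, hdropI] at hall
    have := List.take_append_drop I.toNat A
    apply List.append_inj_left' (hall.trans this.symm)
    simp
  have hgetI : PySem.List.pyGetD A I 0 = A[I.toNat] := PySem.List.pyGetD_eq_getElem A 0 h0 h1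
  have hIp1 : (I+1).toNat = I.toNat + 1 := by omega
  have hsum : A.sum = (A.take I.toNat).sum + (A[I.toNat] + (A.drop (I.toNat+1)).sum) := by
    conv_lhs => rw [← List.sum_take_add_sum_drop A I.toNat]
    rw [List.drop_eq_getElem_cons hIlt, List.sum_cons]
  rw [PySem.List.foldl_add, PySem.List.foldl_add,
    sum_map_sub_const, sum_map_sub_const, htake, hdrop1, hgetI, hsum,
    PySem.List.length_pyRange_one, PySem.List.length_pyRange_one, hIp1]
  have h2 : ((((A.length : Int)) - (I+1)).toNat : Int) = (A.length : Int) - I - 1 := by omega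
  have h3 : (((I - 0).toNat : Int)) = I := by omega
  rw [h2, h3]
  ring

theorem scanA_eq (A : List Int) :
    (PySem.List.pyRange 0 ((A.length : Int)) 1).foldl
        (fun (st : Int × Int) i =>
          if (i + 1) * (PySem.List.pyGetD A (-1) 0 - PySem.List.pyGetD A i 0) > st.1
          then ((i + 1) * (PySem.List.pyGetD A (-1) 0 - PySem.List.pyGetD A i 0), i) else st)
        (0, (A.length : Int) - 1)
      = bestF (fun (k : Nat) => ((k : Int) + 1) * (PySem.List.pyGetD A (-1) 0 - A.getD k 0))
          ((A.length : Int) - 1) A.length := by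
  rw [PySem.List.pyRange_one, List.foldl_map, ← foldl_range_best]
  simp only [zero_add, PySem.List.pyGetD_natCast, Int.sub_zero, Int.toNat_natCast]

theorem solution_eq_alt (A : List Int) : solution A = solution_alt A := by
  by_cases hnil : A = []
  · subst hnil; rfl
  · have hpos : 0 < A.length := List.length_pos_iff.mpr hnil
    simp only [solution, solution_alt, PySem.List.len_eq]
    rw [if_neg hnil, scanA_eq]
    -- B's fused pass is the pair (sum, running max of the gains)
    rw [PySem.List.foldl_prod_mk
      (f := fun (s : Int) (p : Int × Int) => s + p.2)
      (g := fun (s : Int) (p : Int × Int) => max s ((p.1 + 1) * (PySem.List.pyGetD A (-1) 0 - p.2)))]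
    have hsum : (PySem.List.enumerate A 0).foldl (fun (s : Int) (p : Int × Int) => s + p.2) 0
        = A.sum := by
      rw [PySem.List.foldl_add (g := fun (p : Int × Int) => p.2), PySem.List.map_snd_enumerate]
      simp
    have hmax : (PySem.List.enumerate A 0).foldl
        (fun (s : Int) (p : Int × Int) => max s ((p.1 + 1) * (PySem.List.pyGetD A (-1) 0 - p.2))) 0
        = (bestF (fun (k : Nat) => ((k : Int) + 1) * (PySem.List.pyGetD A (-1) 0 - A.getD k 0))
            ((A.length : Int) - 1) A.length).1 := by
      rw [bestF_fst, ← List.foldl_map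
        (f := fun (p : Int × Int) => (p.1 + 1) * (PySem.List.pyGetD A (-1) 0 - p.2)) (g := max),
        enumerate_map]
      simp only [zero_add]
    rw [hsum, hmax]
    set g : Nat → Int := fun k => ((k : Int) + 1) * (PySem.List.pyGetD A (-1) 0 - A.getD k 0) with hg
    rcases bestF_cases g ((A.length : Int) - 1) A.length with ⟨h1, h2⟩ | ⟨k, hk, h1, h2⟩
    · -- scan never fired: index = n-1, maxSave = 0; A[n-1] = A[-1]
      rw [h1, h2, sums_eq A ((A.length : Int) - 1) (by omega) (by omega)]
      have hlast : PySem.List.pyGetD A ((A.length : Int) - 1) 0 = PySem.List.pyGetD A (-1) 0 := by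
        have e1 : ((A.length : Int) - 1) = ((A.length - 1 : Nat) : Int) := by omega
        rw [e1, PySem.List.pyGetD_natCast, PySem.List.pyGetD_neg_one A 0 hnil,
          List.getLast_eq_getElem, List.getD_eq_getElem A 0 (by omega)]
      rw [hlast]
      ring_nf
    · -- scan stopped at k: result telescopes to baseline - g k
      rw [h1, ← h2, sums_eq A (k : Int) (by omega) (by exact_mod_cast hk)]
      rw [PySem.List.pyGetD_natCast]
      simp only [hg]
      ring_nf

-- ===== VERDICT (by name: the statement is the Claim_ definition above) =====
theorem solution_spec : Claim_equal_solution := by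
  intro A _
  unfold Spec_solution
  exact solution_eq_alt A
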